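-- pv_equiv track=rewrite | github.com/thorfinn071/VisionGuide | BlindAssistant.py | compute_nav_state
-- ===== SOURCE A (Python) =====
-- STATE_CLEAR = "clear"
--
-- STATE_CAUTION = "caution"
--
-- STATE_DANGER = "danger"
--
-- def compute_nav_state(detections):
--     if not detections:
--         return STATE_CLEAR
--     has_very_close = any(d.get("dist") == "very close" for d in detections)
--     if has_very_close:
--         return STATE_DANGER
--     has_close = any(d.get("dist") == "close" for d in detections)
--     if has_close:
--         return STATE_CAUTION
--     return STATE_CLEAR
-- ===== SOURCE B (Python) =====
-- STATE_CLEAR = "clear"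
-- STATE_CAUTION = "caution"
-- STATE_DANGER = "danger"
--
-- def compute_nav_state(detections):
--     saw_close = False
--     for d in detections:
--         v = d.get("dist")
--         if v == "very close":
--             return STATE_DANGER
--         if v == "close":
--             saw_close = True
--     return STATE_CAUTION if saw_close else STATE_CLEAR
-- ===== Notes on version B (the rewrite author's own statement) =====
-- stated objective: simpler
-- what changed: Replaced the two separate any() scans (plus an empty-list special case) with a single traversal that early-returns DANGER on the first 'very close' and tracks a saw_close flag.
import Mathlib
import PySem

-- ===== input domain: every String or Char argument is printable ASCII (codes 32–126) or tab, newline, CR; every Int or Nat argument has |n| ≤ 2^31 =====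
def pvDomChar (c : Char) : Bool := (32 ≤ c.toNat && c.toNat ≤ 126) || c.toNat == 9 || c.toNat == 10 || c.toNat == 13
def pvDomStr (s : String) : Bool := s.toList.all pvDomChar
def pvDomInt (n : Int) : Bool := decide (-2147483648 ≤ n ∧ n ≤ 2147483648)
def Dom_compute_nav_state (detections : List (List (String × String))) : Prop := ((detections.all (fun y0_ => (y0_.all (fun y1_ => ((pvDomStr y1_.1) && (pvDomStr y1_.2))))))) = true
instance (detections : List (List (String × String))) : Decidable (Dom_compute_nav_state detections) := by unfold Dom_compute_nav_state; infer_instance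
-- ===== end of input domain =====

-- ===== PORT A =====
-- B replaces A's two any() scans (plus an empty-list special case) with one pass keeping a saw_close flag; same result.
def compute_nav_state (detections : List (List (String × String))) : String :=
  if detections = [] then "clear"
  else if detections.any (fun d => PySem.Dict.get? (PySem.Dict.mk d) "dist" == some "very close") then "danger"
  else if detections.any (fun d => PySem.Dict.get? (PySem.Dict.mk d) "dist" == some "close") then "caution"
  else "clear"

-- ===== PORT B =====
def navLoop : List (List (String × String)) → Bool → String
  | [], sawClose => if sawClose then "caution" else "clear"
  | d :: rest, sawClose =>
    let v := PySem.Dict.get? (PySem.Dict.mk d) "dist"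
    if v == some "very close" then "danger"
    else navLoop rest (sawClose || (v == some "close"))

def compute_nav_state_alt (detections : List (List (String × String))) : String :=
  navLoop detections false

-- ===== PRECONDITION & SPEC =====
def Spec_compute_nav_state (detections : List (List (String × String))) (out : String) : Prop := out = compute_nav_state_alt detections
instance (detections : List (List (String × String))) (out : String) : Decidable (Spec_compute_nav_state detections out) := by unfold Spec_compute_nav_state; infer_instance

-- ===== CLAIM =====
def Claim_equal_compute_nav_state : Prop := ∀ (detections : List (List (String × String))), Dom_compute_nav_state detections → Spec_compute_nav_state detections (compute_nav_state detections)

-- ===== LEMMAS AND PROOFS =====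
theorem navLoop_eq (l : List (List (String × String))) (saw : Bool) :
    navLoop l saw =
      if l.any (fun d => PySem.Dict.get? (PySem.Dict.mk d) "dist" == some "very close") then "danger"
      else if saw || l.any (fun d => PySem.Dict.get? (PySem.Dict.mk d) "dist" == some "close") then "caution"
      else "clear" := by
  induction l generalizing saw with
  | nil => simp [navLoop]
  | cons d rest ih =>
    simp only [navLoop, List.any_cons]
    by_cases hv : (PySem.Dict.get? (PySem.Dict.mk d) "dist" == some "very close") = true
    · simp [hv]
    · simp only [Bool.not_eq_true] at hv
      rw [ih]
      simp [hv, Bool.or_assoc]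

-- ===== VERDICT =====
theorem compute_nav_state_spec : Claim_equal_compute_nav_state := by
  intro detections _
  unfold Spec_compute_nav_state compute_nav_state compute_nav_state_alt
  rw [navLoop_eq]
  cases detections with
  | nil => simp
  | cons d rest => simp
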